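-- pv_equiv track=rewrite | github.com/lucasgommes/game | nenh.py | NoRepeat
-- ===== SOURCE A (Python) =====
-- def countRepeatedNumbersDic(dic: dict):
--     repeteadNumbers = {}
--     for game in dic.values():
--         for number in game:
--             if number in repeteadNumbers:
--                 repeteadNumbers[number] += 1
--             else:
--                 repeteadNumbers[number] = 1
--     return repeteadNumbers
--
-- def NoRepeat(dic:dict):
--     numbers = []
--     auxDic = countRepeatedNumbersDic(dic)
--
--     for i in range(1,26):
--         if i in auxDic:
--             pass
--         else:
--             numbers.append(i)
--     return sorted(numbers)
-- ===== SOURCE B (Python) =====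
-- def NoRepeat(dic: dict):
--     # candidate-driven: for each candidate 1..25 scan the games directly;
--     # no counting structure, no membership set, no final sort needed
--     # (the comprehension already emits candidates in increasing order).
--     return [i for i in range(1, 26) if all(i not in game for game in dic.values())]
-- ===== Notes on version B (the rewrite author's own statement) =====
-- stated objective: alternative
-- what changed: B inverts the traversal: instead of one pass over all games building a count dictionary and then filtering 1-25 against it and sorting, B scans the games per candidate with all(i not in game ...), building no intermediate structure and needing no sort since candidates are emitted in order.
import Mathlib
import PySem

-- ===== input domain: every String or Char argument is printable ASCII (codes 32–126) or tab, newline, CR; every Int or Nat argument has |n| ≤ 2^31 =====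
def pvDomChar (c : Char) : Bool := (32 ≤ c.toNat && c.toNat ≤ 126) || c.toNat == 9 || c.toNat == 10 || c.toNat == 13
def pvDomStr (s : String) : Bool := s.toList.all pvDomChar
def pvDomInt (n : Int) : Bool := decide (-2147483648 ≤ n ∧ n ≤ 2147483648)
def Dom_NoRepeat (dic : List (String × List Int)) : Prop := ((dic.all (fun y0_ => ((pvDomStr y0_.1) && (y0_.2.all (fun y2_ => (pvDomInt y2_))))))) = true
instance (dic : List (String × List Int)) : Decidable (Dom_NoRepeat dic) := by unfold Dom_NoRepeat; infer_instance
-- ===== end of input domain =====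

-- B inverts the traversal: per candidate 1..25 it scans the games directly (all/not-in),
-- building no counting structure and needing no sort; an alternative of similar cost.


-- ===== PORT A =====
-- helper countRepeatedNumbersDic: for each game, for each number, count occurrences
def pvCountRepeatedNumbersDic (dic : List (String × List Int)) : PySem.Dict Int Int :=
  dic.foldl (fun d kv =>
    kv.2.foldl (fun d n =>
      if d.contains n then d.insert n (d.getD n 0 + 1) else d.insert n 1) d)
    PySem.Dict.empty

def NoRepeat (dic : List (String × List Int)) : List Int :=
  let auxDic := pvCountRepeatedNumbersDic dic
  let numbers := (PySem.List.pyRange 1 26 1).foldl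
    (fun acc i => if auxDic.contains i then acc else acc ++ [i]) []
  PySem.List.sorted numbers (fun x => x) false

-- ===== PORT B =====
def NoRepeat_alt (dic : List (String × List Int)) : List Int :=
  (PySem.List.pyRange 1 26 1).filter
    (fun i => dic.all (fun kv => !(kv.2.contains i)))

-- ===== PRECONDITION & SPEC =====
def Spec_NoRepeat (dic : List (String × List Int)) (out : List Int) : Prop := out = NoRepeat_alt dic
instance (dic : List (String × List Int)) (out : List Int) : Decidable (Spec_NoRepeat dic out) := by unfold Spec_NoRepeat; infer_instance

-- ===== CLAIM =====
def Claim_equal_NoRepeat : Prop := ∀ (dic : List (String × List Int)), Dom_NoRepeat dic → Spec_NoRepeat dic (NoRepeat dic)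

-- ===== LEMMAS AND PROOFS =====

-- A's counting step always inserts key n; pull the insert out of the branch
lemma pvStep_eq (d : PySem.Dict Int Int) (n : Int) :
    (if d.contains n then d.insert n (d.getD n 0 + 1) else d.insert n 1)
      = d.insert n (if d.contains n then d.getD n 0 + 1 else 1) := by
  by_cases h : d.contains n <;> simp [h]

-- the keys of A's count dict are the fold of Set.update over the games
lemma keys_pvCount_aux (dic : List (String × List Int)) (d : PySem.Dict Int Int) :
    (dic.foldl (fun d kv =>
      kv.2.foldl (fun d n =>
        if d.contains n then d.insert n (d.getD n 0 + 1) else d.insert n 1) d) d).keys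
      = dic.foldl (fun s kv => PySem.Set.update s kv.2) d.keys := by
  induction dic generalizing d with
  | nil => rfl
  | cons kv rest ih =>
    simp only [List.foldl_cons]
    rw [ih]
    congr 1
    have h : kv.2.foldl (fun d n =>
        if d.contains n then d.insert n (d.getD n 0 + 1) else d.insert n 1) d
        = kv.2.foldl (fun d n => d.insert n (if d.contains n then d.getD n 0 + 1 else 1)) d :=
      PySem.List.foldl_congr_mem _ _ _ _ (fun a x _ => pvStep_eq a x)
    rw [h, PySem.Dict.keys_foldl_insert]

-- membership in the folded Set.update = occurrence in some game
lemma mem_fold_update (dic : List (String × List Int)) (s : PySem.Set Int) (x : Int) :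
    x ∈ dic.foldl (fun s kv => PySem.Set.update s kv.2) s
      ↔ x ∈ s ∨ ∃ kv ∈ dic, x ∈ kv.2 := by
  induction dic generalizing s with
  | nil => simp
  | cons kv rest ih =>
    simp only [List.foldl_cons, ih, PySem.Set.mem_update, List.mem_cons]
    constructor
    · rintro ((h | h) | ⟨p, hp, hx⟩)
      · exact Or.inl h
      · exact Or.inr ⟨kv, Or.inl rfl, h⟩
      · exact Or.inr ⟨p, Or.inr hp, hx⟩
    · rintro (h | ⟨p, (rfl | hp), hx⟩)
      · exact Or.inl (Or.inl h)
      · exact Or.inl (Or.inr hx)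
      · exact Or.inr ⟨p, hp, hx⟩

-- ===== VERDICT =====
theorem NoRepeat_spec : Claim_equal_NoRepeat := by
  intro dic _
  unfold Spec_NoRepeat NoRepeat NoRepeat_alt
  simp only []
  have hstep : List.foldl
      (fun acc i => if (pvCountRepeatedNumbersDic dic).contains i then acc else acc ++ [i])
      [] (PySem.List.pyRange 1 26)
      = List.foldl
      (fun acc i => if ¬ ((pvCountRepeatedNumbersDic dic).contains i = true) then acc ++ [i] else acc)
      [] (PySem.List.pyRange 1 26) := by
    apply PySem.List.foldl_congr_mem
    intro acc i _
    by_cases h : (pvCountRepeatedNumbersDic dic).contains i <;> simp [h]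
  rw [hstep, PySem.List.foldl_append_ite_eq_filter]
  simp only [List.nil_append]
  have hfeq : (PySem.List.pyRange 1 26).filter
        (fun i => decide (¬ ((pvCountRepeatedNumbersDic dic).contains i = true)))
      = (PySem.List.pyRange 1 26).filter
        (fun i => dic.all (fun kv => !(kv.2.contains i))) := by
    apply List.filter_congr
    intro x _
    rw [PySem.Dict.contains_eq_decide_mem_keys]
    unfold pvCountRepeatedNumbersDic
    rw [keys_pvCount_aux]
    have := mem_fold_update dic ((PySem.Dict.empty : PySem.Dict Int Int).keys) x
    simp only [PySem.Dict.empty, PySem.Dict.items, PySem.Dict.keys, List.map_nil,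
      List.not_mem_nil, false_or] at this
    simp only [PySem.Dict.keys, PySem.Dict.empty, List.map_nil, this]
    rw [Bool.eq_iff_iff]
    simp
  rw [hfeq]
  apply PySem.List.sorted_eq_self_of_pairwise
  exact (PySem.List.pairwise_lt_pyRange_one 1 26).filter _ |>.imp le_of_lt
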